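-- pv_equiv track=rewrite | github.com/jimenofonseca/FineBank | statement_parser/preproccessing.py | Categorization
-- ===== SOURCE A (Python) =====
-- def hasNumbers(inputString):
--     return any(char.isdigit() for char in inputString)
--
-- def Categorization(description_str, CATEGORIES):
--     # categorize full phrases
--     cat_flag = True
--     for category_str, names_inside_category in CATEGORIES.items():  # for name, age in dictionary.iteritems():  (for Python 2.x)
--         if description_str in names_inside_category:
--             cat = category_str
--             cat_flag = False
--
--     # categorize first word
--     if cat_flag:
--         for category_str, names_inside_category in CATEGORIES.items():
--             description_split = description_str.split(" ")[
--                 0]  # for name, age in dictionary.iteritems():  (for Python 2.x)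
--             if description_split in names_inside_category:
--                 cat = category_str
--                 cat_flag = False
--
--     # if after the coma the first word matches
--     if cat_flag:
--         for category_str, names_inside_category in CATEGORIES.items():
--             description_split = description_str.split(",")
--             lenght_words = len(description_split)
--             if lenght_words > 1:  # (for Python 2.x)
--                 if description_split[1].split()[0] in names_inside_category:
--                     cat = category_str
--                     cat_flag = False
--
--     # Check if there were payments in foreing currency (generally they are at the end)
--     if cat_flag:
--         for category_str, names_inside_category in CATEGORIES.items():
--             description_split = description_str.split()
--             lenght_words = len(description_split)
--             if lenght_words == 2 and hasNumbers(description_split[1]):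
--                 description_split = description_split[-1][:3]
--                 if description_split in names_inside_category:
--                     cat = category_str
--                     cat_flag = False
--
--     # Check if there were payments in foreing currency (some are at the beginning)
--     if cat_flag:
--         for category_str, names_inside_category in CATEGORIES.items():
--             description_split = description_str.split()
--             lenght_words = len(description_split)
--             if lenght_words == 1 and hasNumbers(description_split[0]):
--                 description_split = description_split[-1][:3]
--                 if description_split in names_inside_category:
--                     cat = category_str
--                     cat_flag = False
--
--     # last resource, if the word is anywhere
--     if cat_flag:
--         for category_str, names_inside_category in CATEGORIES.items():
--             description_split = description_str.split(" ")
--             lenght_words = len(description_split)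
--             if lenght_words > 1:  # (for Python 2.x)
--                 for word in description_split:
--                     if word in names_inside_category:
--                         cat = category_str
--                         cat_flag = False
--
--     if cat_flag:
--         cat = "No Category"
--
--     return cat
-- ===== SOURCE B (Python) =====
-- def hasNumbers(inputString):
--     return any(char.isdigit() for char in inputString)
--
-- def Categorization(description_str, CATEGORIES):
--     # inverted index: name -> category; later categories overwrite earlier ones
--     # (preserves A's last-match-wins rule for single-name lookups)
--     index = {}
--     for category_str, names_inside_category in CATEGORIES.items():
--         for name in names_inside_category:
--             index[name] = category_str
--
--     # 1. full phrase
--     cat = index.get(description_str)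
--
--     # 2. first word
--     if cat is None:
--         cat = index.get(description_str.split(" ")[0])
--
--     # 3. first word after the first comma
--     if cat is None:
--         parts = description_str.split(",")
--         if len(parts) > 1:
--             tokens = parts[1].split()
--             if tokens:
--                 cat = index.get(tokens[0])
--
--     # 4./5. foreign-currency payments: 3-char prefix of the single numeric word
--     if cat is None:
--         words = description_str.split()
--         if len(words) == 2 and hasNumbers(words[1]):
--             cat = index.get(words[1][:3])
--         elif len(words) == 1 and hasNumbers(words[0]):
--             cat = index.get(words[0][:3])
--
--     # 6. any word anywhere: last category (in CATEGORIES order) containing any word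
--     if cat is None:
--         words = description_str.split(" ")
--         if len(words) > 1:
--             for category_str, names_inside_category in reversed(list(CATEGORIES.items())):
--                 if any(word in names_inside_category for word in words):
--                     cat = category_str
--                     break
--
--     return cat if cat is not None else "No Category"
-- ===== Notes on version B (the rewrite author's own statement) =====
-- stated objective: alternative
-- what changed: B builds one inverted index (name -> category, later categories overwriting earlier, preserving A's last-match-wins) and replaces A's five membership-scan passes over CATEGORIES with direct dict lookups; only the final word-anywhere phase remains an ordered scan, done in reverse with early exit. Pre_ excludes only the inputs on which A raises IndexError (blank segment after the first comma with no earlier match); B returns normally there.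
import Mathlib
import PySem

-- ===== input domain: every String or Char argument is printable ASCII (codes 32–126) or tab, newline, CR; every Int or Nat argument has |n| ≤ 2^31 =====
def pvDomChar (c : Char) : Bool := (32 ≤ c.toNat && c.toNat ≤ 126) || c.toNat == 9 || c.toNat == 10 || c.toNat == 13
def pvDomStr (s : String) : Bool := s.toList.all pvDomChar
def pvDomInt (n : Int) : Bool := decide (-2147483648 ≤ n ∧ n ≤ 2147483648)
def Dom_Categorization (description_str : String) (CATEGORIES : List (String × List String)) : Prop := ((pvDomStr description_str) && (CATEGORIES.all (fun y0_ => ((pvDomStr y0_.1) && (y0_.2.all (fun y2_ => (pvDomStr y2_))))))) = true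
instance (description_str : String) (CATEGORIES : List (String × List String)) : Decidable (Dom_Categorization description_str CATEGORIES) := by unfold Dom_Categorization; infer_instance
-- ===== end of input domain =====

-- B replaces A's six membership-scan passes over CATEGORIES by one inverted index (name → category,
-- later categories overwriting earlier ones) consulted by direct lookups; only the last
-- word-anywhere phase remains a scan (reversed, first match). Objective: alternative/simpler structure.

-- shared helpers (used by both ports and by Pre_)
def pvHasNumbers (s : String) : Bool := s.toList.any PySem.Chars.isdigit   -- any(char.isdigit() for char in s)
def pvFirstWord (s : String) : String := ((PySem.Str.split? s " ").getD []).headD ""   -- s.split(" ")[0]; split(" ") is never empty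

-- ===== PORT A =====
-- cat/cat_flag are carried as one Option String (none ⟺ cat_flag True, cat unbound);
-- loop-invariant splits are hoisted (the Python recomputes the identical value each iteration).
def Categorization (description_str : String) (CATEGORIES : List (String × List String)) : String :=
  -- phase 1: full phrase
  let s1 : Option String := CATEGORIES.foldl (fun acc p => if p.2.contains description_str then some p.1 else acc) none
  -- phase 2: first word
  let s2 := if s1.isSome then s1 else
    CATEGORIES.foldl (fun acc p => if p.2.contains (pvFirstWord description_str) then some p.1 else acc) none
  -- phase 3: first word after the first comma; tok3 = none is Python's IndexError, excluded by Pre_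
  let parts := (PySem.Str.split? description_str ",").getD []
  let tok3 := (PySem.Str.split₀ (parts.getD 1 "")).head?
  let s3 := if s2.isSome then s2 else
    CATEGORIES.foldl (fun acc p =>
      if decide (parts.length > 1) then
        (if (match tok3 with | some t => p.2.contains t | none => false) then some p.1 else acc)
      else acc) none
  -- phases 4/5: foreign currency, words[-1][:3]
  let words := PySem.Str.split₀ description_str
  let pre := PySem.Str.slice (PySem.List.pyGetD words (-1) "") none (some 3)
  let s4 := if s3.isSome then s3 else
    CATEGORIES.foldl (fun acc p =>
      if words.length == 2 && pvHasNumbers (words.getD 1 "") then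
        (if p.2.contains pre then some p.1 else acc)
      else acc) none
  let s5 := if s4.isSome then s4 else
    CATEGORIES.foldl (fun acc p =>
      if words.length == 1 && pvHasNumbers (words.getD 0 "") then
        (if p.2.contains pre then some p.1 else acc)
      else acc) none
  -- phase 6: any word anywhere
  let words6 := (PySem.Str.split? description_str " ").getD []
  let s6 := if s5.isSome then s5 else
    CATEGORIES.foldl (fun acc p =>
      if decide (words6.length > 1) then
        words6.foldl (fun a w => if p.2.contains w then some p.1 else a) acc
      else acc) none
  s6.getD "No Category"

-- ===== PORT B =====
def pvBuildIndex (CATEGORIES : List (String × List String)) : PySem.Dict String String :=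
  CATEGORIES.foldl (fun d p => p.2.foldl (fun d n => d.insert n p.1) d) PySem.Dict.empty

def pvRevScan (words : List String) : List (String × List String) → Option String
  | [] => none
  | p :: rest => if words.any (fun w => p.2.contains w) then some p.1 else pvRevScan words rest

def Categorization_alt (description_str : String) (CATEGORIES : List (String × List String)) : String :=
  let index := pvBuildIndex CATEGORIES
  let c1 := index.get? description_str
  let c2 := if c1.isNone then index.get? (pvFirstWord description_str) else c1
  let c3 := if c2.isNone then
      let parts := (PySem.Str.split? description_str ",").getD []
      if parts.length > 1 then
        match (PySem.Str.split₀ (parts.getD 1 "")).head? with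
        | some t => index.get? t
        | none => c2
      else c2
    else c2
  let c4 := if c3.isNone then
      let words := PySem.Str.split₀ description_str
      if words.length == 2 && pvHasNumbers (words.getD 1 "") then
        index.get? (PySem.Str.slice (words.getD 1 "") none (some 3))
      else if words.length == 1 && pvHasNumbers (words.getD 0 "") then
        index.get? (PySem.Str.slice (words.getD 0 "") none (some 3))
      else c3
    else c3
  let c5 := if c4.isNone then
      let words6 := (PySem.Str.split? description_str " ").getD []
      if words6.length > 1 then pvRevScan words6 CATEGORIES.reverse else c4
    else c4
  c5.getD "No Category"

-- ===== PRECONDITION & SPEC =====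
-- the text between the first and the second comma contains no non-whitespace character
def pvBadComma (s : String) : Bool :=
  let parts := (PySem.Str.split? s ",").getD []
  decide (parts.length > 1) && (PySem.Str.split₀ (parts.getD 1 "")).isEmpty

-- Pre_ excludes exactly the inputs on which A raises IndexError: CATEGORIES nonempty, neither the
-- full description nor its first word in any category's names, and a blank segment after the first comma.
def Pre_Categorization (description_str : String) (CATEGORIES : List (String × List String)) : Prop :=
  CATEGORIES = [] ∨ (∃ p ∈ CATEGORIES, description_str ∈ p.2) ∨
    (∃ p ∈ CATEGORIES, pvFirstWord description_str ∈ p.2) ∨ pvBadComma description_str = false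
instance (description_str : String) (CATEGORIES : List (String × List String)) : Decidable (Pre_Categorization description_str CATEGORIES) := by unfold Pre_Categorization; infer_instance

def pvWitness_Categorization : String × (List (String × List String)) := ("coffee shop", [("food", ["coffee"])])

def Spec_Categorization (description_str : String) (CATEGORIES : List (String × List String)) (out : String) : Prop := out = Categorization_alt description_str CATEGORIES
instance (description_str : String) (CATEGORIES : List (String × List String)) (out : String) : Decidable (Spec_Categorization description_str CATEGORIES out) := by unfold Spec_Categorization; infer_instance

-- ===== CLAIM (what is proved, stated in full; the proofs are below) =====
def Claim_equal_Categorization : Prop := ∀ (description_str : String) (CATEGORIES : List (String × List String)), Dom_Categorization description_str CATEGORIES → Pre_Categorization description_str CATEGORIES → Spec_Categorization description_str CATEGORIES (Categorization description_str CATEGORIES)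

-- ===== LEMMAS AND PROOFS =====

-- last category (in list order) satisfying q — the value every phase of A computes
def pvLM (q : String × List String → Bool) (l : List (String × List String)) : Option String :=
  l.foldl (fun acc p => if q p then some p.1 else acc) none

theorem pvFoldl_lm (q : String × List String → Bool) (l : List (String × List String)) :
    ∀ s, l.foldl (fun acc p => if q p then some p.1 else acc) s = (pvLM q l).elim s some := by
  induction l with
  | nil => intro s; rfl
  | cons p l ih =>
    intro s
    simp only [pvLM, List.foldl_cons] at *
    rw [ih (if q p then some p.1 else s), ih (if q p then some p.1 else none)]
    cases h : pvLM q l <;> simp only [pvLM] at h <;> by_cases hq : q p <;> simp [h, hq]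

theorem pvLM_cons (q : String × List String → Bool) (p : String × List String) (l : List (String × List String)) :
    pvLM q (p :: l) = (pvLM q l).elim (if q p then some p.1 else none) some := by
  simp only [pvLM, List.foldl_cons]
  rw [pvFoldl_lm]
  rfl

theorem pvLM_def' (q : String × List String → Bool) (l : List (String × List String)) :
    l.foldl (fun acc p => if q p then some p.1 else acc) none = pvLM q l := rfl

theorem pvLM_false (l : List (String × List String)) :
    pvLM (fun _ => false) l = none := by
  induction l with
  | nil => rfl
  | cons p l ih => rw [pvLM_cons, ih]; rfl

theorem pvStep (s c a b : Option String) (h : s = c) (hab : c = none → a = b) :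
    (if s.isSome then s else a) = (if c.isNone then b else c) := by
  subst h
  cases s with
  | none => simp [hab rfl]
  | some v => simp

theorem pvStep2 (s c a1 a2 b : Option String) (h : s = c)
    (hab : c = none → (if a1.isSome then a1 else a2) = b) :
    (if (if s.isSome then s else a1).isSome then (if s.isSome then s else a1) else a2)
      = (if c.isNone then b else c) := by
  subst h
  cases s with
  | some v => simp
  | none =>
    simp only [Option.isNone_none, if_true]
    rw [← hab rfl]
    cases a1 <;> simp

theorem pvStepG (s c a b : Option String) (h : s = c) (hab : c = none → a = b) :
    (if s.isSome then s else a).getD "No Category" = (if c.isNone then b else c).getD "No Category" := by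
  rw [pvStep s c a b h hab]

theorem pvGet?_foldl_insert (d : PySem.Dict String String) (c : String) (ns : List String) (x : String) :
    (ns.foldl (fun d n => d.insert n c) d).get? x = if ns.contains x then some c else d.get? x := by
  induction ns generalizing d with
  | nil => simp
  | cons n ns ih =>
    rw [List.foldl_cons, ih, List.contains_cons]
    by_cases hm : x ∈ ns
    · simp [hm]
    · by_cases hx : x = n <;> simp [hm, hx, PySem.Dict.get?_insert]

theorem pvGet?_buildIndex (CATS : List (String × List String)) (x : String) :
    (pvBuildIndex CATS).get? x = pvLM (fun p => p.2.contains x) CATS := by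
  induction CATS using List.reverseRecOn with
  | nil => rfl
  | append_singleton l p ih =>
    simp only [pvBuildIndex, pvLM, List.foldl_append, List.foldl_cons, List.foldl_nil] at *
    rw [pvGet?_foldl_insert, ih]

theorem pvLM_guard (g : Bool) (q : String × List String → Bool) (l : List (String × List String)) :
    l.foldl (fun acc p => if g then (if q p then some p.1 else acc) else acc) none
      = if g then pvLM q l else none := by
  cases g with
  | true => simp [pvLM]
  | false => simp

theorem pvInner_words (ns : List String) (c : String) (words : List String) :
    ∀ acc : Option String,
      words.foldl (fun a w => if ns.contains w then some c else a) acc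
        = if words.any (fun w => ns.contains w) then some c else acc := by
  induction words with
  | nil => intro acc; simp
  | cons w ws ih =>
    intro acc
    rw [List.foldl_cons, ih]
    by_cases h : w ∈ ns <;> by_cases h2 : ∃ x ∈ ws, x ∈ ns <;> simp [List.any_cons, h, h2]

theorem pvRevScan_append (words : List String) (a b : List (String × List String)) :
    pvRevScan words (a ++ b) = (pvRevScan words a).elim (pvRevScan words b) some := by
  induction a with
  | nil => rfl
  | cons p a ih =>
    rw [List.cons_append]
    simp only [pvRevScan, ih]
    by_cases h : (words.any fun w => p.2.contains w) = true
    · rw [if_pos h, if_pos h]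
      rfl
    · rw [if_neg h, if_neg h]

theorem pvRevScan_reverse (words : List String) (l : List (String × List String)) :
    pvRevScan words l.reverse = pvLM (fun p => words.any (fun w => p.2.contains w)) l := by
  induction l with
  | nil => rfl
  | cons p l ih =>
    rw [List.reverse_cons, pvRevScan_append, ih, pvLM_cons]
    suffices h1 : pvRevScan words [p] = (if (words.any fun w => p.2.contains w) = true then some p.1 else none) by rw [h1]
    simp only [pvRevScan]

theorem pvGetD_neg_one_len2 (a b : String) :
    PySem.List.pyGetD [a, b] (-1) "" = b := by
  rw [PySem.List.pyGetD_neg_one _ _ (by simp)]; rfl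

theorem pvGetD_neg_one_len1 (a : String) :
    PySem.List.pyGetD [a] (-1) "" = a := by
  rw [PySem.List.pyGetD_neg_one _ _ (by simp)]; rfl

theorem pvMain (description_str : String) (CATEGORIES : List (String × List String)) :
    Categorization description_str CATEGORIES = Categorization_alt description_str CATEGORIES := by
  unfold Categorization Categorization_alt
  simp only [pvGet?_buildIndex, pvRevScan_reverse, pvInner_words, pvLM_guard, pvLM_def']
  apply pvStepG
  · apply pvStep2
    · apply pvStep
      · apply pvStep
        · rfl
        · intro _; rfl
      · -- phase 3
        intro h2
        simp only [h2]
        by_cases hp : ((PySem.Str.split? description_str ",").getD []).length > 1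
        · cases htok : (PySem.Str.split₀ (((PySem.Str.split? description_str ",").getD []).getD 1 "")).head? with
          | some t => simp [hp]
          | none => simp [hp, pvLM_false]
        · simp [hp]
    · -- phases 4/5
      intro h3
      simp only [h3]
      generalize PySem.Str.split₀ description_str = W
      by_cases hg4 : (W.length == 2 && pvHasNumbers (W.getD 1 "")) = true
      · have hlen : W.length = 2 := by
          have h' := hg4
          simp only [Bool.and_eq_true, beq_iff_eq] at h'
          exact h'.1
        obtain ⟨a0, b0, rfl⟩ := List.length_eq_two.mp hlen
        simp only [pvGetD_neg_one_len2, List.getD_cons_succ, List.getD_cons_zero]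
        simp only [List.length_cons, List.length_nil]
        cases pvLM (fun p => p.2.contains (PySem.Str.slice b0 none (some 3))) CATEGORIES <;> simp
      · by_cases hg5 : (W.length == 1 && pvHasNumbers (W.getD 0 "")) = true
        · have hlen : W.length = 1 := by
            have h' := hg5
            simp only [Bool.and_eq_true, beq_iff_eq] at h'
            exact h'.1
          obtain ⟨a0, rfl⟩ := List.length_eq_one_iff.mp hlen
          simp only [hg4, pvGetD_neg_one_len1, List.getD_cons_zero]
          cases pvLM (fun p => p.2.contains (PySem.Str.slice a0 none (some 3))) CATEGORIES <;> simp
        · simp only [if_neg hg4, if_neg hg5]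
          simp
  · -- phase 6
    intro h4
    simp only [h4]
    by_cases h6 : ((PySem.Str.split? description_str " ").getD []).length > 1
    · simp [h6]
    · simp [h6]

-- ===== VERDICT (by name: the statement is the Claim_ definition above) =====
theorem Categorization_spec : Claim_equal_Categorization := by
  intro d C _ _
  unfold Spec_Categorization
  exact pvMain d C
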